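-- pv_equiv track=rewrite | github.com/yamasampo/nothingspecial | mystat/simulate_null_D_dist_KS2samples.py | freq_dist_2samples
-- ===== SOURCE A (Python) =====
-- def freq_dist_2samples(sample1, sample2):
--     mi = min(min(sample1) , min(sample2))
--     ma = max(max(sample1) , max(sample2))
--     data_range = [i for i in range(mi, ma+1)]
--     fd1 = []
--     fd2 = []
--     for a in data_range:
--         fd1.append(sample1.count(a))
--         fd2.append(sample2.count(a))
--     return data_range, fd1, fd2
-- ===== SOURCE B (Python) =====
-- def freq_dist_2samples(sample1, sample2):
--     mi = min(min(sample1), min(sample2))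
--     ma = max(max(sample1), max(sample2))
--     data_range = list(range(mi, ma + 1))
--     R = ma - mi + 1
--     fd1 = [0] * R
--     fd2 = [0] * R
--     for x in sample1:
--         fd1[x - mi] += 1
--     for x in sample2:
--         fd2[x - mi] += 1
--     return data_range, fd1, fd2
-- ===== Notes on version B (the rewrite author's own statement) =====
-- stated objective: faster
-- what changed: Replaces the per-value rescan (calling sample.count(a) for every value in the combined range) with a single tally pass: zero-filled arrays of length ma-mi+1 are incremented once per sample element, so each sample is traversed once instead of once per candidate value.
import Mathlib
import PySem

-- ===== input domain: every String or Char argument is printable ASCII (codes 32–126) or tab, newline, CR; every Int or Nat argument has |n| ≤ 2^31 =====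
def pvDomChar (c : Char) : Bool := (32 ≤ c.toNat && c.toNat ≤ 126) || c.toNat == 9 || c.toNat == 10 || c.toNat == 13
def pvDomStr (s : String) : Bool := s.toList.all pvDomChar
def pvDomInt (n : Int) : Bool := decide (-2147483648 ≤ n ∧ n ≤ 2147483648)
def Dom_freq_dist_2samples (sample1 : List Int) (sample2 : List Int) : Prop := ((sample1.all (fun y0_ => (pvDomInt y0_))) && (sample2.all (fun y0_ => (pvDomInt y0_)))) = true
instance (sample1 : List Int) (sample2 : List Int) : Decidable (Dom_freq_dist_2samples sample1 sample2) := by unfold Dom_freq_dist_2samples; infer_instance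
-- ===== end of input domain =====

-- B replaces A's per-range-value rescans (sample.count(a) for every a in the combined range)
-- with one zero-filled tally array per sample, incremented in a single pass over that sample;
-- the data_range is computed the same way.

-- ===== PORT A =====
-- A: mi/ma via min/max over both samples, then for each a in range(mi, ma+1)
-- append sample1.count(a) / sample2.count(a).  The fallback branch is unreachable
-- under Pre_ (Python raises ValueError on an empty sample).
def freq_dist_2samples (sample1 : List Int) (sample2 : List Int) : List Int × List Int × List Int :=
  match PySem.List.min? sample1 (fun x => x), PySem.List.min? sample2 (fun x => x),
        PySem.List.max? sample1 (fun x => x), PySem.List.max? sample2 (fun x => x) with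
  | some m1, some m2, some M1, some M2 =>
      let mi := min m1 m2
      let ma := max M1 M2
      let data_range := PySem.List.pyRange mi (ma + 1) 1
      let fds := data_range.foldl
        (fun (p : List Int × List Int) a =>
          (p.1 ++ [(PySem.List.count sample1 a : Int)],
           p.2 ++ [(PySem.List.count sample2 a : Int)]))
        ([], [])
      (data_range, fds.1, fds.2)
  | _, _, _, _ => ([], [], [])

-- ===== PORT B =====
-- B helper: 'for x in s: fd[x - mi] += 1'
def pvTally (mi : Int) (s : List Int) (fd0 : List Int) : List Int :=
  s.foldl (fun fd x => PySem.List.pySetD fd (x - mi) (PySem.List.pyGetD fd (x - mi) 0 + 1)) fd0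

-- B helper: mi = min(min(s1), min(s2)), ma = max(max(s1), max(s2)); none iff a sample is empty
def pvBounds (m1? m2? M1? M2? : Option Int) : Option (Int × Int) :=
  m1?.bind fun m1 => m2?.bind fun m2 => M1?.bind fun M1 => M2?.bind fun M2 =>
    some (min m1 m2, max M1 M2)

def freq_dist_2samples_alt (sample1 : List Int) (sample2 : List Int) : List Int × List Int × List Int :=
  ((pvBounds (PySem.List.min? sample1 (fun x => x)) (PySem.List.min? sample2 (fun x => x))
      (PySem.List.max? sample1 (fun x => x)) (PySem.List.max? sample2 (fun x => x))).map
    (fun p =>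
      let mi := p.1
      let ma := p.2
      let data_range := PySem.List.pyRange mi (ma + 1) 1
      let fd1 := pvTally mi sample1 (PySem.List.pyRepeat [0] (ma - mi + 1))
      let fd2 := pvTally mi sample2 (PySem.List.pyRepeat [0] (ma - mi + 1))
      (data_range, fd1, fd2))).getD ([], [], [])

-- ===== PRECONDITION & SPEC =====
-- Pre_ excludes exactly the inputs where Python A raises ValueError: an empty sample (min([])/max([])).
def Pre_freq_dist_2samples (sample1 : List Int) (sample2 : List Int) : Prop :=
  sample1 ≠ [] ∧ sample2 ≠ []
instance (sample1 : List Int) (sample2 : List Int) : Decidable (Pre_freq_dist_2samples sample1 sample2) := by unfold Pre_freq_dist_2samples; infer_instance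
def pvWitness_freq_dist_2samples : List Int × List Int := ([0, 2], [1])
def Spec_freq_dist_2samples (sample1 : List Int) (sample2 : List Int) (out : List Int × List Int × List Int) : Prop := out = freq_dist_2samples_alt sample1 sample2
instance (sample1 : List Int) (sample2 : List Int) (out : List Int × List Int × List Int) : Decidable (Spec_freq_dist_2samples sample1 sample2 out) := by unfold Spec_freq_dist_2samples; infer_instance

-- ===== CLAIM (what is proved, stated in full; the proofs are below) =====
def Claim_equal_freq_dist_2samples : Prop := ∀ (sample1 : List Int) (sample2 : List Int), Dom_freq_dist_2samples sample1 sample2 → Pre_freq_dist_2samples sample1 sample2 → Spec_freq_dist_2samples sample1 sample2 (freq_dist_2samples sample1 sample2)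

-- ===== LEMMAS AND PROOFS =====

theorem pvTally_length (mi : Int) (s : List Int) (fd0 : List Int) :
    (pvTally mi s fd0).length = fd0.length := by
  induction s generalizing fd0 with
  | nil => rfl
  | cons x t ih =>
      simp only [pvTally, List.foldl_cons] at *
      rw [ih, PySem.List.length_pySetD]

theorem pvTally_getD (mi : Int) (s : List Int) (fd0 : List Int) (j : Nat)
    (hj : j < fd0.length)
    (hb : ∀ x ∈ s, mi ≤ x ∧ (x - mi).toNat < fd0.length) :
    (pvTally mi s fd0).getD j 0 = fd0.getD j 0 + (s.count (mi + (j : Int)) : Int) := by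
  induction s generalizing fd0 with
  | nil => simp [pvTally]
  | cons x t ih =>
      obtain ⟨hx1, hx2⟩ := hb x (by simp)
      have hnn : (0 : Int) ≤ x - mi := by omega
      have hlt : (x - mi).toNat < fd0.length := hx2
      simp only [pvTally, List.foldl_cons]
      set fd1 := PySem.List.pySetD fd0 (x - mi) (PySem.List.pyGetD fd0 (x - mi) 0 + 1) with hfd1
      have hlen1 : fd1.length = fd0.length := PySem.List.length_pySetD _ _ _
      have := ih fd1 (by omega) (fun y hy => by
        obtain ⟨h1, h2⟩ := hb y (by simp [hy]); exact ⟨h1, by omega⟩)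
      simp only [pvTally] at this
      rw [this]
      have hget : PySem.List.pyGetD fd0 (x - mi) 0 = fd0.getD (x - mi).toNat 0 := by
        rw [PySem.List.pyGetD_eq_getElem _ _ hnn (by omega)]
        exact (List.getD_eq_getElem fd0 0 hlt).symm
      have hset : fd1 = fd0.set (x - mi).toNat (PySem.List.pyGetD fd0 (x - mi) 0 + 1) := by
        rw [hfd1, PySem.List.pySetD_of_nonneg _ _ hnn]
      by_cases hc : x = mi + (j : Int)
      · have hjx : (x - mi).toNat = j := by omega
        rw [hset, hjx, hget, hjx]
        have : (fd0.set j (fd0.getD j 0 + 1)).getD j 0 = fd0.getD j 0 + 1 := by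
          rw [List.getD_eq_getElem _ _ (by simp; omega)]
          simp
        rw [this, List.count_cons]
        simp [hc]
        ring
      · have hjx : (x - mi).toNat ≠ j := by omega
        have : fd1.getD j 0 = fd0.getD j 0 := by
          rw [hset, List.getD_eq_getElem _ _ (by simp; omega), List.getElem_set_ne (by omega),
            List.getD_eq_getElem _ _ hj]
        rw [this, List.count_cons]
        simp [hc]

-- the tallied array equals A's per-value count list
theorem pvTally_eq_map (mi ma : Int) (s : List Int)
    (hb : ∀ x ∈ s, mi ≤ x ∧ x ≤ ma) (hle : mi ≤ ma) :
    (PySem.List.pyRange mi (ma + 1) 1).map (fun a => (PySem.List.count s a : Int))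
      = pvTally mi s (PySem.List.pyRepeat [0] (ma - mi + 1)) := by
  have hrep : PySem.List.pyRepeat [0] (ma - mi + 1) = List.replicate (ma - mi + 1).toNat (0 : Int) :=
    PySem.List.pyRepeat_singleton _ _
  have hlen0 : (PySem.List.pyRepeat ([0] : List Int) (ma - mi + 1)).length = (ma - mi + 1).toNat := by
    rw [hrep, List.length_replicate]
  have hb' : ∀ x ∈ s, mi ≤ x ∧ (x - mi).toNat < (PySem.List.pyRepeat ([0] : List Int) (ma - mi + 1)).length := by
    intro x hx
    obtain ⟨h1, h2⟩ := hb x hx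
    exact ⟨h1, by rw [hlen0]; omega⟩
  apply List.ext_getElem
  · rw [List.length_map, PySem.List.length_pyRange_one, pvTally_length, hlen0]
    omega
  · intro j h1 h2
    have hjlt : j < (ma - mi + 1).toNat := by
      have := pvTally_length mi s (PySem.List.pyRepeat [0] (ma - mi + 1))
      omega
    rw [List.getElem_map, PySem.List.getElem_pyRange_one]
    rw [← List.getD_eq_getElem _ 0 h2]
    rw [pvTally_getD mi s _ j (by omega) hb']
    rw [hrep, List.getD_eq_getElem _ _ (by simpa using hjlt)]
    simp [PySem.List.count_eq]

-- ===== VERDICT (by name: the statement is the Claim_ definition above) =====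
theorem freq_dist_2samples_spec : Claim_equal_freq_dist_2samples := by
  intro sample1 sample2 _hdom hpre
  obtain ⟨h1, h2⟩ := hpre
  obtain ⟨m1, hm1⟩ : ∃ m, PySem.List.min? sample1 (fun x => x) = some m := by
    cases hc : PySem.List.min? sample1 (fun x => x) with
    | none => exact absurd ((PySem.List.min?_eq_none_iff _ _).mp hc) h1
    | some m => exact ⟨m, rfl⟩
  obtain ⟨m2, hm2⟩ : ∃ m, PySem.List.min? sample2 (fun x => x) = some m := by
    cases hc : PySem.List.min? sample2 (fun x => x) with
    | none => exact absurd ((PySem.List.min?_eq_none_iff _ _).mp hc) h2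
    | some m => exact ⟨m, rfl⟩
  obtain ⟨M1, hM1⟩ : ∃ m, PySem.List.max? sample1 (fun x => x) = some m := by
    cases hc : PySem.List.max? sample1 (fun x => x) with
    | none => exact absurd ((PySem.List.max?_eq_none_iff _ _).mp hc) h1
    | some m => exact ⟨m, rfl⟩
  obtain ⟨M2, hM2⟩ : ∃ m, PySem.List.max? sample2 (fun x => x) = some m := by
    cases hc : PySem.List.max? sample2 (fun x => x) with
    | none => exact absurd ((PySem.List.max?_eq_none_iff _ _).mp hc) h2
    | some m => exact ⟨m, rfl⟩
  unfold Spec_freq_dist_2samples freq_dist_2samples freq_dist_2samples_alt pvBounds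
  rw [hm1, hm2, hM1, hM2]
  simp only [Option.bind, Option.map, Option.getD]
  set mi := min m1 m2 with hmi
  set ma := max M1 M2 with hma
  have hmile : mi ≤ ma := by
    have hmem := PySem.List.min?_mem hm1
    have := PySem.List.max?_isMax hM1 m1 hmem
    simp only [hmi, hma]; omega
  have hb1 : ∀ x ∈ sample1, mi ≤ x ∧ x ≤ ma := fun x hx =>
    ⟨le_trans (min_le_left _ _) (PySem.List.min?_isMin hm1 x hx),
     le_trans (PySem.List.max?_isMax hM1 x hx) (le_max_left _ _)⟩
  have hb2 : ∀ x ∈ sample2, mi ≤ x ∧ x ≤ ma := fun x hx =>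
    ⟨le_trans (min_le_right _ _) (PySem.List.min?_isMin hm2 x hx),
     le_trans (PySem.List.max?_isMax hM2 x hx) (le_max_right _ _)⟩
  rw [PySem.List.foldl_prod_mk
    (f := fun acc a => acc ++ [(PySem.List.count sample1 a : Int)])
    (g := fun acc a => acc ++ [(PySem.List.count sample2 a : Int)])]
  simp only [PySem.List.foldl_append_singleton_eq_map, List.nil_append]
  rw [pvTally_eq_map mi ma sample1 hb1 hmile, pvTally_eq_map mi ma sample2 hb2 hmile]
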